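-- pv_equiv track=rewrite | github.com/kclauw/grokking-oinformation-icml | src/create_plots.py | group_unique_params
-- ===== SOURCE A (Python) =====
-- def group_unique_params(param_list, keys):
--   """Groups unique parameter combinations based on specified keys.
--
--   Args:
--       param_list: A list of dictionaries, where each dictionary represents a set of parameters.
--       keys: A list of keys to use for grouping.
--
--   Returns:
--       A list of lists, where each inner list contains dictionaries with the same values for the specified keys.
--   """
--
--   grouped_params = []
--   seen = set()
--
--   for params in param_list:
--     key_tuple = tuple(params[key] for key in keys)
--     if key_tuple not in seen:
--       seen.add(key_tuple)
--       grouped_params.append([])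
--     grouped_params[-1].append(params)
--
--   return grouped_params
-- ===== SOURCE B (Python) =====
-- def group_unique_params(param_list, keys):
--     """Two-pass re-implementation: label each params dict with an integer
--     group-id (the number of distinct key-tuples seen so far), then emit one
--     group per id via a comprehension over the id range."""
--     seen = set()
--     ids = []
--     g = 0
--     for params in param_list:
--         t = tuple(params[k] for k in keys)
--         if t not in seen:
--             seen.add(t)
--             g += 1
--         ids.append(g)
--     return [[p for p, i in zip(param_list, ids) if i == j] for j in range(1, g + 1)]
-- ===== Notes on version B (the rewrite author's own statement) =====
-- stated objective: alternative
-- what changed: A builds the groups in one pass by appending an empty group at each first-occurrence key-tuple and always appending to the last group; B first labels every element with an integer group-id (the running count of distinct key-tuples) and then emits one group per id by a comprehension over the id range.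
import Mathlib
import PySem

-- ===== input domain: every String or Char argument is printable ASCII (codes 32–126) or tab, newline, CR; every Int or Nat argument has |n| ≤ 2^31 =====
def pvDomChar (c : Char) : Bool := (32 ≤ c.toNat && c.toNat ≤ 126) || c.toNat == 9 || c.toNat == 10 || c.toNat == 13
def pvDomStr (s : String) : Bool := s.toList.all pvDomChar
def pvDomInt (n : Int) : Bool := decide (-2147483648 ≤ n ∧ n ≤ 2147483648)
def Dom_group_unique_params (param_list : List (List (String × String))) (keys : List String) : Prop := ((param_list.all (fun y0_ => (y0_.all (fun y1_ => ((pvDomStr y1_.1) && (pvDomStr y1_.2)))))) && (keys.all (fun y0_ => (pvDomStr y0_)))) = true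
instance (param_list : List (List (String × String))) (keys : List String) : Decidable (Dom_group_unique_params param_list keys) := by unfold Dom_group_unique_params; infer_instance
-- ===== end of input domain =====

-- B relabels the input with integer group-ids in a first pass and emits one group per id in a second pass,
-- instead of A's single pass that appends to the last group; proved to return the same grouping.


-- ===== PORT A =====
-- tuple(params[key] for key in keys); exact where every key is present (Pre_ below); Python raises KeyError otherwise
def pvKeyTuple (params : List (String × String)) (keys : List String) : List String :=
  keys.map (fun k => ((PySem.Dict.mk params).get? k).getD "")

-- one iteration of A's loop body (state = (grouped_params, seen)); grouped_params[-1].append(params)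
-- is rendered total with dropLast/getLastD — after the `if` the list is provably never empty
def pvStepA (keys : List String)
    (st : List (List (List (String × String))) × PySem.Set (List String))
    (params : List (String × String)) :
    List (List (List (String × String))) × PySem.Set (List String) :=
  let kt := pvKeyTuple params keys
  let st' := if PySem.Set.contains st.2 kt then st else (st.1 ++ [[]], PySem.Set.add st.2 kt)
  (st'.1.dropLast ++ [st'.1.getLastD [] ++ [params]], st'.2)

def group_unique_params (param_list : List (List (String × String))) (keys : List String) : List (List (List (String × String))) :=
  (param_list.foldl (pvStepA keys) ([], PySem.Set.empty)).1

-- ===== PORT B =====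
-- one iteration of B's first pass (state = (seen, g, ids))
def pvStepB (keys : List String)
    (st : PySem.Set (List String) × Int × List Int)
    (params : List (String × String)) :
    PySem.Set (List String) × Int × List Int :=
  let t := pvKeyTuple params keys
  if PySem.Set.contains st.1 t then (st.1, st.2.1, st.2.2 ++ [st.2.1])
  else (PySem.Set.add st.1 t, st.2.1 + 1, st.2.2 ++ [st.2.1 + 1])

def group_unique_params_alt (param_list : List (List (String × String))) (keys : List String) : List (List (List (String × String))) :=
  let st := param_list.foldl (pvStepB keys) (PySem.Set.empty, 0, [])
  (PySem.List.pyRange 1 (st.2.1 + 1) 1).map (fun j =>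
    ((param_list.zip st.2.2).filter (fun pi => pi.2 == j)).map Prod.fst)

-- ===== PRECONDITION & SPEC =====
-- Pre_ excludes exactly the inputs where Python's params[key] raises KeyError (a key missing from some dict)
def Pre_group_unique_params (param_list : List (List (String × String))) (keys : List String) : Prop :=
  ∀ params ∈ param_list, ∀ k ∈ keys, k ∈ params.map Prod.fst
instance (param_list : List (List (String × String))) (keys : List String) : Decidable (Pre_group_unique_params param_list keys) := by unfold Pre_group_unique_params; infer_instance
def pvWitness_group_unique_params : (List (List (String × String))) × List String :=
  ([[("a", "1"), ("b", "2")], [("a", "1"), ("b", "3")]], ["a"])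

def Spec_group_unique_params (param_list : List (List (String × String))) (keys : List String) (out : List (List (List (String × String)))) : Prop := out = group_unique_params_alt param_list keys
instance (param_list : List (List (String × String))) (keys : List String) (out : List (List (List (String × String)))) : Decidable (Spec_group_unique_params param_list keys out) := by unfold Spec_group_unique_params; infer_instance

-- ===== CLAIM (what is proved, stated in full; the proofs are below) =====
def Claim_equal_group_unique_params : Prop := ∀ (param_list : List (List (String × String))) (keys : List String), Dom_group_unique_params param_list keys → Pre_group_unique_params param_list keys → Spec_group_unique_params param_list keys (group_unique_params param_list keys)

-- ===== LEMMAS AND PROOFS =====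

-- the grouping both programs compute, as B's second pass writes it
def pvGroups (p : List (List (String × String))) (ids : List Int) (g : Int) : List (List (List (String × String))) :=
  (PySem.List.pyRange 1 (g + 1) 1).map (fun j => ((p.zip ids).filter (fun pi => pi.2 == j)).map Prod.fst)

-- joint loop invariant: after any prefix p, A's state and B's state line up
theorem pv_invariant (keys : List String) (p : List (List (String × String))) :
    let a := p.foldl (pvStepA keys) ([], PySem.Set.empty)
    let b := p.foldl (pvStepB keys) (PySem.Set.empty, 0, [])
    a.2 = b.1 ∧ b.2.2.length = p.length ∧ (∀ i ∈ b.2.2, 1 ≤ i ∧ i ≤ b.2.1) ∧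
      0 ≤ b.2.1 ∧ (b.2.1 = 0 → b.1 = PySem.Set.empty) ∧ a.1 = pvGroups p b.2.2 b.2.1 := by
  induction p using List.reverseRecOn with
  | nil =>
      simp only [List.foldl_nil]
      refine ⟨by trivial, by trivial, by simp, by norm_num, by trivial, ?_⟩
      simp [pvGroups, PySem.List.pyRange_one_eq_nil (by omega : (1:Int) ≤ 1)]
  | append_singleton p x ih =>
      simp only [List.foldl_append, List.foldl_cons, List.foldl_nil] at *
      obtain ⟨hseen, hlen, hbnd, hg0, hgz, hgs⟩ := ih
      set a := p.foldl (pvStepA keys) ([], PySem.Set.empty) with ha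
      set b := p.foldl (pvStepB keys) (PySem.Set.empty, 0, []) with hb
      set t := pvKeyTuple x keys with ht
      by_cases hmem : t ∈ b.1
      · -- repeated key-tuple: B appends id g, A appends x to the last group
        have hg1 : 1 ≤ b.2.1 := by
          rcases eq_or_lt_of_le hg0 with h0 | h0
          · exfalso
            rw [hgz h0.symm] at hmem
            simp [PySem.Set.empty] at hmem
          · omega
        have hstepB : pvStepB keys b x = (b.1, b.2.1, b.2.2 ++ [b.2.1]) := by
          simp [pvStepB, ← ht, hmem]
        have hstepA : pvStepA keys a x =
            (a.1.dropLast ++ [a.1.getLastD [] ++ [x]], a.2) := by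
          simp [pvStepA, ← ht, hseen, hmem, List.getLastD_eq_getLast?]
        rw [hstepA, hstepB]
        dsimp only
        refine ⟨hseen, by simp [hlen], ?_, by omega, by omega, ?_⟩
        · intro i hi
          rcases List.mem_append.1 hi with h | h
          · exact hbnd i h
          · simp at h; omega
        · -- the grouping after one more repeated element
          have hzip : (p ++ [x]).zip (b.2.2 ++ [b.2.1]) =
              p.zip b.2.2 ++ [(x, b.2.1)] := List.zip_append hlen.symm
          unfold pvGroups
          rw [hzip, PySem.List.pyRange_one_succ_right hg1, List.map_append]
          unfold pvGroups at hgs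
          rw [PySem.List.pyRange_one_succ_right hg1, List.map_append] at hgs
          rw [hgs]
          simp only [List.map_cons, List.map_nil]
          rw [List.dropLast_concat, List.getLastD_concat]
          congr 1
          · apply List.map_congr_left
            intro j hj
            have hj' := PySem.List.mem_pyRange_one.1 hj
            have hne : ((b.2.1 : Int) == j) = false := by simp; omega
            simp [List.filter_append, hne]
          · simp [List.filter_append]
      · -- new key-tuple: B opens id g+1, A appends an empty group then x into it
        have hstepB : pvStepB keys b x =
            (PySem.Set.add b.1 t, b.2.1 + 1, b.2.2 ++ [b.2.1 + 1]) := by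
          simp [pvStepB, ← ht, hmem]
        have hstepA : pvStepA keys a x = (a.1 ++ [[x]], PySem.Set.add a.2 t) := by
          simp [pvStepA, ← ht, hseen, hmem, List.getLastD_eq_getLast?]
        rw [hstepA, hstepB]
        dsimp only
        refine ⟨by rw [hseen], by simp [hlen], ?_, by omega, by omega, ?_⟩
        · intro i hi
          rcases List.mem_append.1 hi with h | h
          · exact ⟨(hbnd i h).1, by have := (hbnd i h).2; omega⟩
          · simp at h; omega
        · have hzip : (p ++ [x]).zip (b.2.2 ++ [b.2.1 + 1]) =
              p.zip b.2.2 ++ [(x, b.2.1 + 1)] := List.zip_append hlen.symm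
          have hnil : (p.zip b.2.2).filter (fun pi => pi.2 == b.2.1 + 1) = [] := by
            rw [List.filter_eq_nil_iff]
            intro pr hpr
            have h2 := (hbnd pr.2 (List.of_mem_zip hpr).2).2
            simp; omega
          unfold pvGroups
          rw [hzip, PySem.List.pyRange_one_succ_right (by omega : (1:Int) ≤ b.2.1 + 1),
            List.map_append]
          congr 1
          · rw [hgs]
            unfold pvGroups
            apply List.map_congr_left
            intro j hj
            have hj' := PySem.List.mem_pyRange_one.1 hj
            have hne : ((b.2.1 + 1 : Int) == j) = false := by simp; omega
            simp [List.filter_append, hne]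
          · simp [List.filter_append, hnil]

-- ===== VERDICT (by name: the statement is the Claim_ definition above) =====
theorem group_unique_params_spec : Claim_equal_group_unique_params := by
  intro param_list keys _ _
  have h := pv_invariant keys param_list
  simp only at h
  unfold Spec_group_unique_params group_unique_params group_unique_params_alt
  rw [h.2.2.2.2.2]
  rfl
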